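-- pv_equiv track=rewrite | github.com/chikingsley/episodic | all-language-data-work/pimsleur-gen/src/spaced_repetition.py | total_occurrences_by_lesson
-- ===== SOURCE A (Python) =====
-- CROSS_LESSON_PATTERN = {
--     1: 17,   # Intensive introduction
--     2: 6,    # Heavy reinforcement
--     3: 5,    # Reinforcement
--     4: 4,    # Maintenance
--     5: 2,    # Light maintenance
--     6: 0,    # Gap
--     7: 0,    # Gap
--     8: 0,    # Gap
--     9: 3,    # Returns
--     # 10+: 1 every ~4-5 lessons
-- }
--
-- MAINTENANCE_PERIOD = 4
--
-- def expected_occurrences(lesson: int, introduction_lesson: int = 1) -> int: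
--     """Calculate expected occurrences of a word in a given lesson.
--
--     Args:
--         lesson: The lesson number (1-30)
--         introduction_lesson: The lesson where the word was introduced
--
--     Returns:
--         Expected number of times the word appears in the lesson
--
--     Example:
--         >>> expected_occurrences(1, 1)  # Word introduced in L1, checking L1
--         17
--         >>> expected_occurrences(5, 1)  # Word introduced in L1, checking L5
--         2
--         >>> expected_occurrences(10, 1)  # Periodic maintenance
--         1
--     """
--     if lesson < introduction_lesson:
--         return 0
--
--     relative_lesson = lesson - introduction_lesson + 1
--
--     if relative_lesson in CROSS_LESSON_PATTERN:
--         return CROSS_LESSON_PATTERN[relative_lesson]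
--
--     # After the pattern, periodic maintenance every MAINTENANCE_PERIOD lessons
--     # First maintenance is 4 lessons after L9, then every 4 lessons
--     if relative_lesson > max(CROSS_LESSON_PATTERN.keys()):
--         lessons_after_pattern = relative_lesson - max(CROSS_LESSON_PATTERN.keys())
--         if lessons_after_pattern % MAINTENANCE_PERIOD == 0:
--             return 1
--         return 0
--
--     return 0
--
-- def total_occurrences_by_lesson(
--     introduction_lesson: int = 1,
--     target_lesson: int = 30,
-- ) -> int:
--     """Calculate total occurrences from introduction to target lesson.
--
--     Args:
--         introduction_lesson: When the word was introduced
--         target_lesson: Calculate total up to this lesson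
--
--     Returns:
--         Total number of times the word should have appeared
--     """
--     return sum(
--         expected_occurrences(lesson, introduction_lesson)
--         for lesson in range(introduction_lesson, target_lesson + 1)
--     )
-- ===== SOURCE B (Python) =====
-- # Closed-form: prefix sums of the fixed 9-lesson pattern plus arithmetic count of periodic maintenance hits.
-- _PREFIX = (0, 17, 23, 28, 32, 34, 34, 34, 34, 37)
--
-- def total_occurrences_by_lesson(introduction_lesson=1, target_lesson=30):
--     n = target_lesson - introduction_lesson + 1
--     if n <= 0:
--         return 0
--     if n <= 9:
--         return _PREFIX[n]
--     return 37 + (n - 9) // 4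
-- ===== Notes on version B (the rewrite author's own statement) =====
-- stated objective: faster
-- what changed: Replaces the per-lesson loop summing expected_occurrences with an O(1) closed form: a precomputed prefix-sum table for the fixed 9-lesson pattern plus integer division counting the periodic maintenance hits.
import Mathlib
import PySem

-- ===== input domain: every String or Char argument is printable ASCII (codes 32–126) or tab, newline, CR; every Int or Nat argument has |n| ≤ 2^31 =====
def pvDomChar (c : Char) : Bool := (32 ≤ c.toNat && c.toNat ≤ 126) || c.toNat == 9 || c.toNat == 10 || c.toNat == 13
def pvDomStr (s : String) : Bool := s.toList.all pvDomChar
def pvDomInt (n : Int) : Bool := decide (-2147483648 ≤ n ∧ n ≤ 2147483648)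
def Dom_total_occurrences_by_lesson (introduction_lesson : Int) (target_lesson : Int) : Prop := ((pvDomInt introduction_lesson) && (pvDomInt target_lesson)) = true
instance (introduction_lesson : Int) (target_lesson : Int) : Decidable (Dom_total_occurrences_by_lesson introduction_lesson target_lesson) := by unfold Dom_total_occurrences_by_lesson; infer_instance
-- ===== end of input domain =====

-- B replaces A's per-lesson summation loop with an O(1) closed form: prefix sums of the fixed
-- 9-lesson pattern plus an arithmetic count of the periodic maintenance hits.

-- ===== PORT A =====
def CROSS_LESSON_PATTERN : PySem.Dict Int Int :=
  PySem.Dict.ofList [(1, 17), (2, 6), (3, 5), (4, 4), (5, 2), (6, 0), (7, 0), (8, 0), (9, 3)]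

def MAINTENANCE_PERIOD : Int := 4

def expected_occurrences (lesson : Int) (introduction_lesson : Int) : Int :=
  if lesson < introduction_lesson then 0
  else
    let relative_lesson := lesson - introduction_lesson + 1
    match CROSS_LESSON_PATTERN.get? relative_lesson with
    | some v => v
    | none =>
      -- max() of the dict's keys; the dict is a nonempty literal, so max? is always `some`
      let m := (PySem.List.max? CROSS_LESSON_PATTERN.keys (fun y => y)).getD 0
      if relative_lesson > m then
        if PySem.Int.mod (relative_lesson - m) MAINTENANCE_PERIOD = 0 then 1 else 0
      else 0

def total_occurrences_by_lesson (introduction_lesson : Int) (target_lesson : Int) : Int :=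
  (PySem.List.pyRange introduction_lesson (target_lesson + 1) 1).foldl
    (fun acc lesson => acc + expected_occurrences lesson introduction_lesson) 0

-- ===== PORT B =====
def pvPrefix : List Int := [0, 17, 23, 28, 32, 34, 34, 34, 34, 37]

def total_occurrences_by_lesson_alt (introduction_lesson : Int) (target_lesson : Int) : Int :=
  let n := target_lesson - introduction_lesson + 1
  if n ≤ 0 then 0
  else if n ≤ 9 then PySem.List.pyGetD pvPrefix n 0  -- index is provably in 1..9 here
  else 37 + PySem.Int.floordiv (n - 9) 4

-- ===== PRECONDITION & SPEC =====
def Spec_total_occurrences_by_lesson (introduction_lesson : Int) (target_lesson : Int) (out : Int) : Prop := out = total_occurrences_by_lesson_alt introduction_lesson target_lesson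
instance (introduction_lesson : Int) (target_lesson : Int) (out : Int) : Decidable (Spec_total_occurrences_by_lesson introduction_lesson target_lesson out) := by unfold Spec_total_occurrences_by_lesson; infer_instance

-- ===== CLAIM (what is proved, stated in full; the proofs are below) =====
def Claim_equal_total_occurrences_by_lesson : Prop := ∀ (introduction_lesson : Int) (target_lesson : Int), Dom_total_occurrences_by_lesson introduction_lesson target_lesson → Spec_total_occurrences_by_lesson introduction_lesson target_lesson (total_occurrences_by_lesson introduction_lesson target_lesson)

-- ===== LEMMAS AND PROOFS =====

-- per-relative-lesson value of A, proof-side closed form (k = relative_lesson - 1)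
def pvE (k : Nat) : Int :=
  if k < 9 then ([17, 6, 5, 4, 2, 0, 0, 0, 3] : List Int).getD k 0
  else if (k - 8) % 4 = 0 then 1 else 0

-- running-total closed form
def pvF (k : Nat) : Int :=
  if k ≤ 9 then pvPrefix.getD k 0
  else 37 + ((k - 9) / 4 : Nat)

lemma pattern_get?_none (r : Int) (h : 9 < r) : CROSS_LESSON_PATTERN.get? r = none := by
  rw [PySem.Dict.get?_eq_none_iff_not_mem_keys]
  have hk : CROSS_LESSON_PATTERN.keys = [1, 2, 3, 4, 5, 6, 7, 8, 9] := by decide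
  rw [hk]
  simp only [List.mem_cons, List.not_mem_nil, or_false]
  push Not
  omega

lemma expected_eq (i : Int) (k : Nat) :
    expected_occurrences (i + (k : Int)) i = pvE k := by
  have hnl : ¬ (i + (k : Int) < i) := by omega
  simp only [expected_occurrences, if_neg hnl]
  rw [show i + (k : Int) - i + 1 = ((k + 1 : Nat) : Int) by push_cast; ring]
  by_cases h9 : k < 9
  · interval_cases k <;> decide
  · rw [pattern_get?_none _ (by omega)]
    have hm : (PySem.List.max? CROSS_LESSON_PATTERN.keys (fun y => y)).getD 0 = 9 := by decide
    simp only [hm, MAINTENANCE_PERIOD]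
    rw [if_pos (by omega : ((k + 1 : Nat) : Int) > 9)]
    simp only [PySem.Int.mod_eq_zero_iff_dvd]
    unfold pvE
    rw [if_neg h9]
    split_ifs with h1 h2 h2 <;> first | rfl | (exfalso; omega)

lemma pvF_succ (n : Nat) : pvF (n + 1) = pvF n + pvE n := by
  by_cases h : n ≤ 9
  · interval_cases n <;> decide
  · unfold pvF pvE
    rw [if_neg (by omega : ¬ n + 1 ≤ 9), if_neg (by omega : ¬ n ≤ 9),
        if_neg (by omega : ¬ n < 9)]
    split_ifs with hd <;> push_cast <;> omega

lemma sum_eq (k : Nat) (i : Int) :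
    (PySem.List.pyRange i (i + (k : Int)) 1).foldl
      (fun acc lesson => acc + expected_occurrences lesson i) 0 = pvF k := by
  induction k with
  | zero =>
    rw [show i + ((0 : Nat) : Int) = i by push_cast; ring,
        PySem.List.pyRange_one_eq_nil (by omega)]
    rfl
  | succ n ih =>
    rw [show i + ((n + 1 : Nat) : Int) = (i + (n : Int)) + 1 by push_cast; ring,
        PySem.List.pyRange_one_succ_right (by omega),
        List.foldl_append]
    simp only [List.foldl_cons, List.foldl_nil]
    rw [ih, expected_eq, pvF_succ]

-- ===== VERDICT (by name: the statement is the Claim_ definition above) =====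
theorem total_occurrences_by_lesson_spec : Claim_equal_total_occurrences_by_lesson := by
  intro i t _
  unfold Spec_total_occurrences_by_lesson total_occurrences_by_lesson total_occurrences_by_lesson_alt
  by_cases hle : t + 1 ≤ i
  · rw [PySem.List.pyRange_one_eq_nil hle, if_pos (by omega : t - i + 1 ≤ 0)]
    rfl
  · set k : Nat := (t + 1 - i).toNat with hk
    have h1 : 1 ≤ k := by omega
    rw [show t + 1 = i + (k : Int) by omega, sum_eq k i]
    rw [if_neg (by omega : ¬ t - i + 1 ≤ 0)]
    have hn : t - i + 1 = (k : Int) := by omega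
    rw [hn]
    unfold pvF
    by_cases h9 : k ≤ 9
    · rw [if_pos h9, if_pos (by omega : (k : Int) ≤ 9), PySem.List.pyGetD_natCast]
    · rw [if_neg h9, if_neg (by omega : ¬ (k : Int) ≤ 9),
          PySem.Int.floordiv_eq_ediv_of_pos (by norm_num)]
      omega
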